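-- pv_equiv track=rewrite | github.com/BenLangmead/qtip | src/ts.py | parse_aligner_parameters_from_argv
-- ===== SOURCE A (Python) =====
-- def parse_aligner_parameters_from_argv(_argv):
--     argv = _argv[:]
--     sections = [[]]
--     for arg in argv:
--         if arg == '--':
--             sections.append([])
--         else:
--             sections[-1].append(arg)
--     new_argv = sections[0]
--     aligner_args = [] if len(sections) < 2 else sections[1]
--     aligner_unpaired_args = [] if len(sections) < 3 else sections[2]
--     aligner_paired_args = [] if len(sections) < 4 else sections[3]
--     return new_argv, aligner_args, aligner_unpaired_args, aligner_paired_args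
-- ===== SOURCE B (Python) =====
-- def parse_aligner_parameters_from_argv(_argv):
--     # Search-and-slice: repeatedly find the next '--', slice the section off,
--     # then pad with empty sections and index the first four.
--     secs = []
--     rest = _argv
--     while '--' in rest:
--         j = rest.index('--')
--         secs.append(rest[:j])
--         rest = rest[j+1:]
--     secs = secs + [rest] + [[], [], [], []]
--     return secs[0], secs[1], secs[2], secs[3]
-- ===== Notes on version B (the rewrite author's own statement) =====
-- stated objective: alternative
-- what changed: Replaces the element-by-element scan that appends each arg into the current bucket with a search-and-slice loop: find the next '--' with index(), cut the section out with slices, then pad with empty sections and index the first four.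
import Mathlib
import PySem

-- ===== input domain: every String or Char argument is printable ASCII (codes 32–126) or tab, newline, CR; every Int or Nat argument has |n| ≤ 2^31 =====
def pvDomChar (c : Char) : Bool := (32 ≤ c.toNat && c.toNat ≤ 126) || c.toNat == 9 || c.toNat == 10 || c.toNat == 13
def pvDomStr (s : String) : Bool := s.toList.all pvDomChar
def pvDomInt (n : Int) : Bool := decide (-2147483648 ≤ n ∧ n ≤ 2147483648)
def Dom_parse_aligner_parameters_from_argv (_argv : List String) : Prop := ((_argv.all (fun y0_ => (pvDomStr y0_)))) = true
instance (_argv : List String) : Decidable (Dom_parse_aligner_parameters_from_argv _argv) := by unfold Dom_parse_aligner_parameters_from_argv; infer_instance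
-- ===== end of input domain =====

-- B replaces A's element-by-element bucket scan with a search-and-slice loop (find next '--', slice the section off, pad, index); alternative decomposition, same cost.

-- ===== PORT A =====
-- one loop step: '--' opens a new section, anything else is appended to the last section
def pvStepA (sections : List (List String)) (arg : String) : List (List String) :=
  if arg == "--" then sections ++ [[]]
  else sections.dropLast ++ [sections.getLastD [] ++ [arg]]

def parse_aligner_parameters_from_argv (_argv : List String) : List String × List String × List String × List String :=
  let argv := _argv   -- argv = _argv[:] (the copy is unobservable in the return value)
  let sections := argv.foldl pvStepA [[]]
  let new_argv := sections.getD 0 []          -- sections[0]; sections is never empty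
  let aligner_args := if sections.length < 2 then [] else sections.getD 1 []
  let aligner_unpaired_args := if sections.length < 3 then [] else sections.getD 2 []
  let aligner_paired_args := if sections.length < 4 then [] else sections.getD 3 []
  (new_argv, aligner_args, aligner_unpaired_args, aligner_paired_args)

-- ===== PORT B =====
-- the while loop of Source B: '--' in rest / rest.index('--') / slices rest[:j], rest[j+1:]
-- (j = idxOf is Python's rest.index('--'); slices with nonnegative bounds are take/drop exactly)
def pvSectionsB (rest : List String) : List (List String) :=
  if hm : "--" ∈ rest then
    let j := rest.idxOf "--"
    rest.take j :: pvSectionsB (rest.drop (j + 1))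
  else [rest]
termination_by rest.length
decreasing_by
  have hj := List.idxOf_lt_length_of_mem hm
  have hd : (rest.drop (rest.idxOf "--" + 1)).length = rest.length - (rest.idxOf "--" + 1) :=
    List.length_drop
  omega

def parse_aligner_parameters_from_argv_alt (_argv : List String) : List String × List String × List String × List String :=
  let secs := pvSectionsB _argv ++ [[], [], [], []]
  (secs.getD 0 [], secs.getD 1 [], secs.getD 2 [], secs.getD 3 [])

-- ===== PRECONDITION & SPEC =====
def Spec_parse_aligner_parameters_from_argv (_argv : List String) (out : List String × List String × List String × List String) : Prop := out = parse_aligner_parameters_from_argv_alt _argv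
instance (_argv : List String) (out : List String × List String × List String × List String) : Decidable (Spec_parse_aligner_parameters_from_argv _argv out) := by unfold Spec_parse_aligner_parameters_from_argv; infer_instance

-- ===== CLAIM (what is proved, stated in full; the proofs are below) =====
def Claim_equal_parse_aligner_parameters_from_argv : Prop := ∀ (_argv : List String), Dom_parse_aligner_parameters_from_argv _argv → Spec_parse_aligner_parameters_from_argv _argv (parse_aligner_parameters_from_argv _argv)

-- ===== LEMMAS AND PROOFS =====

-- canonical structural splitter both ports are reduced to
def pvMapHead (f : List String → List String) : List (List String) → List (List String)
  | [] => []
  | h :: t => f h :: t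

def pvSplit : List String → List (List String)
  | [] => [[]]
  | x :: xs => if x = "--" then [] :: pvSplit xs else pvMapHead (x :: ·) (pvSplit xs)

theorem pvMapHead_mapHead (f g : List String → List String) (s : List (List String)) :
    pvMapHead f (pvMapHead g s) = pvMapHead (fun h => f (g h)) s := by
  cases s <;> simp [pvMapHead]

theorem pvMapHead_congr {f g : List String → List String} (hfg : ∀ h, f h = g h)
    (s : List (List String)) : pvMapHead f s = pvMapHead g s := by
  cases s <;> simp [pvMapHead, hfg]

theorem pvMapHead_id (s : List (List String)) : pvMapHead (fun h => h) s = s := by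
  cases s <;> simp [pvMapHead]

-- A-side invariant
theorem foldl_pvStepA (xs : List String) : ∀ (acc : List (List String)) (cur : List String),
    List.foldl pvStepA (acc ++ [cur]) xs = acc ++ pvMapHead (cur ++ ·) (pvSplit xs) := by
  induction xs with
  | nil => intro acc cur; simp [pvSplit, pvMapHead]
  | cons x xs ih =>
    intro acc cur
    by_cases hx : x = "--"
    · subst hx
      have h1 : pvStepA (acc ++ [cur]) "--" = (acc ++ [cur]) ++ [[]] := by
        simp [pvStepA]
      simp only [List.foldl_cons, h1, ih (acc ++ [cur]) []]
      rw [List.append_assoc]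
      simp only [pvSplit]
      cases pvSplit xs <;> simp [pvMapHead]
    · have h1 : pvStepA (acc ++ [cur]) x = acc ++ [cur ++ [x]] := by
        simp [pvStepA, hx]
      simp only [List.foldl_cons, h1, ih acc (cur ++ [x])]
      simp only [pvSplit, if_neg hx]
      rw [pvMapHead_mapHead]
      congr 1
      apply pvMapHead_congr
      intro h
      simp

theorem foldl_pvStepA_nil (xs : List String) :
    List.foldl pvStepA [[]] xs = pvSplit xs := by
  have := foldl_pvStepA xs [] []
  simpa [pvMapHead_id] using this

-- B-side: the search-and-slice loop computes the same splitter
theorem pvSectionsB_eq (xs : List String) : pvSectionsB xs = pvSplit xs := by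
  induction xs with
  | nil =>
    rw [pvSectionsB.eq_def]
    simp [pvSplit]
  | cons x xs ih =>
    by_cases hx : x = "--"
    · subst hx
      rw [pvSectionsB.eq_def]
      rw [dif_pos (List.mem_cons_self ..)]
      simp [pvSplit, List.idxOf_cons_self, ih]
    · by_cases hmem : "--" ∈ xs
      · have hmem' : "--" ∈ x :: xs := List.mem_cons_of_mem _ hmem
        have hidx : (x :: xs).idxOf "--" = xs.idxOf "--" + 1 := by
          simp [hx]
        rw [pvSectionsB.eq_def, dif_pos hmem']
        conv_rhs => rw [pvSplit, if_neg hx, ← ih, pvSectionsB.eq_def, dif_pos hmem]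
        simp [hidx, pvMapHead]
      · have hmem' : "--" ∉ x :: xs := by
          simp only [List.mem_cons, not_or]
          exact ⟨fun h => hx h.symm, hmem⟩
        rw [pvSectionsB.eq_def, dif_neg hmem']
        rw [pvSplit, if_neg hx, ← ih, pvSectionsB.eq_def, dif_neg hmem]
        simp [pvMapHead]

-- padding with [] then indexing within the first four is plain getD
theorem getD_pad (s : List (List String)) (k : Nat) (hk : k ≤ 3) :
    (s ++ [[], [], [], []]).getD k [] = s.getD k [] := by
  by_cases h : k < s.length
  · simp [List.getD, List.getElem?_append_left h]
  · rw [Nat.not_lt] at h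
    rw [List.getD_eq_default _ _ h]
    simp only [List.getD, List.getElem?_append_right h]
    have : k - s.length < 4 := by omega
    interval_cases hkk : (k - s.length) <;> simp

theorem if_short_getD (s : List (List String)) (k : Nat) :
    (if s.length < k + 1 then [] else s.getD k []) = s.getD k [] := by
  split
  · rw [List.getD_eq_default]; omega
  · rfl

-- ===== VERDICT (by name: the statement is the Claim_ definition above) =====
theorem parse_aligner_parameters_from_argv_spec : Claim_equal_parse_aligner_parameters_from_argv := by
  intro argv _
  show _ = _
  unfold parse_aligner_parameters_from_argv parse_aligner_parameters_from_argv_alt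
  simp only [foldl_pvStepA_nil, pvSectionsB_eq,
    getD_pad _ 0 (by omega), getD_pad _ 1 (by omega), getD_pad _ 2 (by omega), getD_pad _ 3 (by omega),
    if_short_getD]
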